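-- pv_equiv track=rewrite | github.com/Wiebe2004/prog | Examen_programming1_230124_nm_ti_bcs/02-File-IO/Variant1-gpt/student_scores.py | highest_scorer
-- ===== SOURCE A (Python) =====
-- def highest_scorer(scores):
--     lijst = []
--     hoogste = max(scores.values())
--     for name,score in scores.items():
--         # score = int(score)
--         if score == hoogste:
--             lijst.append(name)
--             hoogste = score
--     return lijst
-- ===== SOURCE B (Python) =====
-- def highest_scorer(scores):
--     groups = {}
--     for name, score in scores.items():
--         groups.setdefault(score, []).append(name)
--     return groups[max(groups)]
-- ===== Notes on version B (the rewrite author's own statement) =====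
-- stated objective: alternative
-- what changed: B builds a score-to-names grouping dict in one pass and returns groups[max(groups)], instead of A's precomputed max plus a filtering loop that keeps reassigning the maximum.
import Mathlib
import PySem

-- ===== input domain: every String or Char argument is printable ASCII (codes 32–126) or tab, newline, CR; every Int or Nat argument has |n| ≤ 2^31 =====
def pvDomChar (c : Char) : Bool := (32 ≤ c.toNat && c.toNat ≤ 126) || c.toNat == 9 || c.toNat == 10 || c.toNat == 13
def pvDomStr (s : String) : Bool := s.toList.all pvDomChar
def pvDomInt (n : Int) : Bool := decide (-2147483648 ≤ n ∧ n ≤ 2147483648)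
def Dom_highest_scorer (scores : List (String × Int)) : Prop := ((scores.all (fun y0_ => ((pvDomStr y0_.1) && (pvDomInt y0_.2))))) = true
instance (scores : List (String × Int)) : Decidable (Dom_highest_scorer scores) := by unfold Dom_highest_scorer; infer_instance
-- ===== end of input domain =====

-- B builds a score -> names grouping dict in one pass and returns the group of max(groups);
-- objective: alternative decomposition, same O(n) cost. Return-value equivalence only.

-- ===== PORT A =====
-- hoogste = max(scores.values()); then the loop with state (lijst, hoogste).
def highest_scorer (scores : List (String × Int)) : List String :=
  match PySem.List.max? (scores.map (·.2)) (fun x => x) with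
  | none => []   -- unreachable under Pre_: Python raises ValueError on an empty dict
  | some h0 =>
    (scores.foldl
      (fun (st : List String × Int) p =>
        if p.2 == st.2 then (st.1 ++ [p.1], p.2) else st)
      ([], h0)).1

-- ===== PORT B =====
-- groups.setdefault(score, []).append(name)  ≡  modify score [] (· ++ [name]); then groups[max(groups)].
def highest_scorer_alt (scores : List (String × Int)) : List String :=
  let groups := scores.foldl
    (fun (d : PySem.Dict Int (List String)) p => d.modify p.2 [] (fun l => l ++ [p.1]))
    PySem.Dict.empty
  match PySem.List.max? groups.keys (fun x => x) with
  | none => []   -- unreachable under Pre_: Python raises ValueError on an empty dict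
  | some m => groups.getD m []

-- ===== PRECONDITION & SPEC =====
-- Pre_ excludes only the empty dict, on which both Pythons raise ValueError (max of empty sequence).
def Pre_highest_scorer (scores : List (String × Int)) : Prop := scores ≠ []
instance (scores : List (String × Int)) : Decidable (Pre_highest_scorer scores) := by
  unfold Pre_highest_scorer; infer_instance
def pvWitness_highest_scorer : (List (String × Int)) := [("alice", 3), ("bob", 3), ("carl", 1)]

def Spec_highest_scorer (scores : List (String × Int)) (out : List String) : Prop := out = highest_scorer_alt scores
instance (scores : List (String × Int)) (out : List String) : Decidable (Spec_highest_scorer scores out) := by unfold Spec_highest_scorer; infer_instance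

-- ===== CLAIM (what is proved, stated in full; the proofs are below) =====
def Claim_equal_highest_scorer : Prop := ∀ (scores : List (String × Int)), Dom_highest_scorer scores → Pre_highest_scorer scores → Spec_highest_scorer scores (highest_scorer scores)

-- ===== LEMMAS AND PROOFS =====

-- A's loop: since `hoogste` is only reassigned to an equal value, the fold is a filter.
theorem hsA_foldl (l : List (String × Int)) (acc : List String) (M : Int) :
    l.foldl (fun (st : List String × Int) p =>
        if p.2 == st.2 then (st.1 ++ [p.1], p.2) else st) (acc, M)
      = (acc ++ (l.filter (fun p => p.2 == M)).map (·.1), M) := by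
  induction l generalizing acc with
  | nil => simp
  | cons p t ih =>
    simp only [List.foldl_cons]
    by_cases h : p.2 = M
    · rw [if_pos (by simpa using h), h, ih]
      simp [h]
    · rw [if_neg (by simpa using h), ih]
      simp [h]

theorem hsB_groups (scores : List (String × Int)) :
    scores.foldl
      (fun (d : PySem.Dict Int (List String)) p => d.modify p.2 [] (fun l => l ++ [p.1]))
      PySem.Dict.empty
    = (scores.map Prod.swap).foldl
        (fun (d : PySem.Dict Int (List String)) p => d.modify p.1 [] (fun l => l ++ [p.2]))
        PySem.Dict.empty := by
  rw [List.foldl_map]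
  rfl

theorem highest_scorer_spec : Claim_equal_highest_scorer := by
  intro scores _ hpre
  unfold Spec_highest_scorer highest_scorer highest_scorer_alt
  set G := scores.foldl
    (fun (d : PySem.Dict Int (List String)) p => d.modify p.2 [] (fun l => l ++ [p.1]))
    PySem.Dict.empty with hG
  have hkeys : G.keys = PySem.Set.ofList (scores.map (·.2)) := by
    rw [hG]
    have h := @PySem.Dict.keys_foldl_modify_key Int (List String) _ _
      (String × Int) scores (fun p => p.2) [] (fun _ p l => l ++ [p.1]) PySem.Dict.empty
    simpa [PySem.Dict.keys_empty, PySem.Set.update_nil_left] using h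
  have hmemkeys : ∀ x, x ∈ G.keys ↔ x ∈ scores.map (·.2) := by
    intro x; rw [hkeys]; exact PySem.Set.mem_ofList _ _
  -- values list is nonempty: exhibit its head
  obtain ⟨v, vs, hv⟩ : ∃ v vs, scores.map (·.2) = v :: vs := by
    cases hs : scores.map (·.2) with
    | nil => exact absurd (List.map_eq_nil_iff.mp hs) hpre
    | cons a b => exact ⟨a, b, rfl⟩
  have hM : PySem.List.max? (scores.map (·.2)) (fun x => x) = some (vs.foldl max v) := by
    rw [hv, PySem.List.max?_id_cons]
  set M := vs.foldl max v with hMdef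
  have hMmem : M ∈ scores.map (·.2) := PySem.List.max?_mem hM
  have hMmax : ∀ y ∈ scores.map (·.2), y ≤ M := PySem.List.max?_isMax hM
  -- keys list is nonempty as well
  obtain ⟨k, ks, hk⟩ : ∃ k ks, G.keys = k :: ks := by
    cases hs : G.keys with
    | nil => rw [hs] at hmemkeys; simpa using (hmemkeys M).mpr hMmem
    | cons a b => exact ⟨a, b, rfl⟩
  have hM' : PySem.List.max? G.keys (fun x => x) = some (ks.foldl max k) := by
    rw [hk, PySem.List.max?_id_cons]
  have hM'eq : ks.foldl max k = M := by
    have h1 : ks.foldl max k ∈ scores.map (·.2) :=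
      (hmemkeys _).mp (PySem.List.max?_mem hM')
    have h2 : M ≤ ks.foldl max k :=
      PySem.List.max?_isMax hM' M ((hmemkeys M).mpr hMmem)
    exact le_antisymm (hMmax _ h1) h2
  have hget : G.getD M [] = (scores.filter (fun p => p.2 == M)).map (·.1) := by
    rw [hG, hsB_groups, PySem.Dict.getD_foldl_modify_append]
    simp [List.filter_map, Function.comp_def]
  simp only [hM, hM', hM'eq, hsA_foldl, hget, List.nil_append]
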